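-- pv_equiv track=rewrite | github.com/ladeng07/-Python- | 解高级数独的探索.py | kuai
-- ===== SOURCE A (Python) =====
-- def kuai(l,x,y,num_l):
-- 	if x<3 and y<3:
-- 		return list([i for i in num_l if i not in [e for i in l[:3] for e in i[:3]]])
-- 	elif 2<x<6 and y<3:
-- 		return list([i for i in num_l if i not in [e for i in l[:3] for e in i[3:6]]])
-- 	elif 5<x and y<3:
-- 		return list([i for i in num_l if i not in [e for i in l[:3] for e in i[6:]]])
-- 	elif x<3 and 2<y<6:
-- 		return list([i for i in num_l if i not in [e for i in l[3:6] for e in i[:3]]])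
-- 	elif 2<x<6 and 2<y<6:
-- 		return list([i for i in num_l if i not in [e for i in l[3:6] for e in i[3:6]]])
-- 	elif 5<x and 2<y<6:
-- 		return list([i for i in num_l if i not in [e for i in l[3:6] for e in i[6:]]])
-- 	elif x<3 and 5<y:
-- 		return list([i for i in num_l if i not in [e for i in l[6:] for e in i[:3]]])
-- 	elif 2<x<6 and 5<y:
-- 		return list([i for i in num_l if i not in [e for i in l[6:] for e in i[3:6]]])
-- 	elif 5<x and 5<y:
-- 		return list([i for i in num_l if i not in [e for i in l[6:] for e in i[6:]]])
-- ===== SOURCE B (Python) =====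
-- def kuai(l, x, y, num_l):
--     # Coordinate-scan: no slicing and no box list; every cell is visited with its
--     # indices and kept candidates are those no same-band cell equals.
--     def band(t):
--         return 0 if t < 3 else 1 if t < 6 else 2
--     return [i for i in num_l
--             if not any(e == i and band(ri) == band(y) and band(ci) == band(x)
--                        for ri, row in enumerate(l)
--                        for ci, e in enumerate(row))]
-- ===== Notes on version B (the rewrite author's own statement) =====
-- stated objective: alternative
-- what changed: A picks one of nine slice-built box lists via an if/elif chain and filters candidates against it; B never slices or builds a box: it scans the whole grid with enumerate coordinates and keeps a candidate iff no cell whose row/column band (computed arithmetically) matches y/x equals it.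
import Mathlib
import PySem

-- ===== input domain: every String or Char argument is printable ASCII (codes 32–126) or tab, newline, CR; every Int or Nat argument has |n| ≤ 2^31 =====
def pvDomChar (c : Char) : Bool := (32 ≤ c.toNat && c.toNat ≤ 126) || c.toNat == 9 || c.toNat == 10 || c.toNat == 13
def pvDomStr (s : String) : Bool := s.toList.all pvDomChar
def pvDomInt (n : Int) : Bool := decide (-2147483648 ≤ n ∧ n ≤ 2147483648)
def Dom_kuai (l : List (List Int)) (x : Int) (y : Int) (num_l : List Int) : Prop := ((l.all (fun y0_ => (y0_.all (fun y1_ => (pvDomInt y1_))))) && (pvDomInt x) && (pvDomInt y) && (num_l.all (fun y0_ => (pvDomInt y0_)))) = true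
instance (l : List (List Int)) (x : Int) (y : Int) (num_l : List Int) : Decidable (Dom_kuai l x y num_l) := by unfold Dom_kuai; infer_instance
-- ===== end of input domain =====

-- B replaces A's nine slice-selected box lists by one coordinate scan of the whole grid with arithmetic band tests (alternative decomposition; return value only).


-- ===== PORT A =====
def kuai (l : List (List Int)) (x : Int) (y : Int) (num_l : List Int) : List Int :=
  if x < 3 ∧ y < 3 then
    num_l.filter (fun i => !(((PySem.List.slice l none (some 3)).flatMap (fun r => PySem.List.slice r none (some 3))).contains i))
  else if 2 < x ∧ x < 6 ∧ y < 3 then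
    num_l.filter (fun i => !(((PySem.List.slice l none (some 3)).flatMap (fun r => PySem.List.slice r (some 3) (some 6))).contains i))
  else if 5 < x ∧ y < 3 then
    num_l.filter (fun i => !(((PySem.List.slice l none (some 3)).flatMap (fun r => PySem.List.slice r (some 6) none)).contains i))
  else if x < 3 ∧ 2 < y ∧ y < 6 then
    num_l.filter (fun i => !(((PySem.List.slice l (some 3) (some 6)).flatMap (fun r => PySem.List.slice r none (some 3))).contains i))
  else if 2 < x ∧ x < 6 ∧ 2 < y ∧ y < 6 then
    num_l.filter (fun i => !(((PySem.List.slice l (some 3) (some 6)).flatMap (fun r => PySem.List.slice r (some 3) (some 6))).contains i))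
  else if 5 < x ∧ 2 < y ∧ y < 6 then
    num_l.filter (fun i => !(((PySem.List.slice l (some 3) (some 6)).flatMap (fun r => PySem.List.slice r (some 6) none)).contains i))
  else if x < 3 ∧ 5 < y then
    num_l.filter (fun i => !(((PySem.List.slice l (some 6) none).flatMap (fun r => PySem.List.slice r none (some 3))).contains i))
  else if 2 < x ∧ x < 6 ∧ 5 < y then
    num_l.filter (fun i => !(((PySem.List.slice l (some 6) none).flatMap (fun r => PySem.List.slice r (some 3) (some 6))).contains i))
  else -- the remaining Python branch '5<x and 5<y' is the only case left for integer x, y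
    num_l.filter (fun i => !(((PySem.List.slice l (some 6) none).flatMap (fun r => PySem.List.slice r (some 6) none)).contains i))

-- ===== PORT B =====
-- Source B's band(t): 0 if t < 3 else 1 if t < 6 else 2
def pvBand (t : Int) : Int := if t < 3 then 0 else if t < 6 then 1 else 2

def kuai_alt (l : List (List Int)) (x : Int) (y : Int) (num_l : List Int) : List Int :=
  num_l.filter (fun i =>
    !((PySem.List.enumerate l 0).any (fun rr =>
        (PySem.List.enumerate rr.2 0).any (fun ce =>
          (ce.2 == i) && (pvBand rr.1 == pvBand y) && (pvBand ce.1 == pvBand x)))))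

-- ===== PRECONDITION & SPEC =====
def Spec_kuai (l : List (List Int)) (x : Int) (y : Int) (num_l : List Int) (out : List Int) : Prop := out = kuai_alt l x y num_l
instance (l : List (List Int)) (x : Int) (y : Int) (num_l : List Int) (out : List Int) : Decidable (Spec_kuai l x y num_l out) := by unfold Spec_kuai; infer_instance

-- ===== CLAIM =====
def Claim_equal_kuai : Prop := ∀ (l : List (List Int)) (x : Int) (y : Int) (num_l : List Int), Dom_kuai l x y num_l → Spec_kuai l x y num_l (kuai l x y num_l)

-- ===== LEMMAS AND PROOFS =====

-- a slice-band of a list: indices lo ≤ k (< hi, when hi is given)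
def bandSlice {α : Type} (xs : List α) (lo : Nat) (hi : Option Nat) : List α :=
  match hi with
  | none => xs.drop lo
  | some n => (xs.drop lo).take (n - lo)

def inHi (hi : Option Nat) (k : Nat) : Bool :=
  match hi with
  | none => true
  | some n => k < n

theorem mem_bandSlice {α : Type} (xs : List α) (lo : Nat) (hi : Option Nat) (a : α) :
    a ∈ bandSlice xs lo hi ↔ ∃ k, ∃ _ : k < xs.length, lo ≤ k ∧ inHi hi k = true ∧ xs[k] = a := by
  cases hi with
  | none =>
    simp only [bandSlice, inHi, true_and]
    rw [show xs.drop lo = (xs.drop lo).take (xs.length) from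
      (List.take_of_length_le (by simp)).symm]
    simp only [List.mem_take_iff_getElem, List.getElem_drop]
    constructor
    · rintro ⟨j, hj, rfl⟩
      refine ⟨lo + j, ?_, ?_, rfl⟩ <;> (simp at hj; omega)
    · rintro ⟨k, hk, hlo, rfl⟩
      exact ⟨k - lo, by simp; omega, by congr 1; omega⟩
  | some n =>
    simp only [bandSlice, inHi, List.mem_take_iff_getElem, List.getElem_drop,
      decide_eq_true_eq]
    constructor
    · rintro ⟨j, hj, rfl⟩
      refine ⟨lo + j, ?_, ?_, ?_, rfl⟩ <;> (simp at hj; omega)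
    · rintro ⟨k, hk, hlo, hn, rfl⟩
      exact ⟨k - lo, by simp; omega, by congr 1; omega⟩

-- the core fact: membership in a slice-built box equals B's banded coordinate scan
theorem box_scan (l : List (List Int)) (x y i : Int)
    (rows : List (List Int)) (cols : List Int → List Int)
    (rlo clo : Nat) (rhi chi : Option Nat)
    (hrows : rows = bandSlice l rlo rhi) (hcols : ∀ r, cols r = bandSlice r clo chi)
    (hr : ∀ k : Nat, (pvBand ↑k == pvBand y) = (decide (rlo ≤ k) && inHi rhi k))
    (hc : ∀ k : Nat, (pvBand ↑k == pvBand x) = (decide (clo ≤ k) && inHi chi k)) :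
    ((rows.flatMap cols).contains i)
    = ((PySem.List.enumerate l 0).any (fun rr =>
        (PySem.List.enumerate rr.2 0).any (fun ce =>
          (ce.2 == i) && (pvBand rr.1 == pvBand y) && (pvBand ce.1 == pvBand x)))) := by
  subst hrows
  rw [Bool.eq_iff_iff]
  simp only [List.contains_eq_mem, List.any_eq_true, PySem.List.mem_enumerate_iff,
    List.mem_flatMap, decide_eq_true_eq, hcols, mem_bandSlice]
  constructor
  · rintro ⟨r, ⟨k, hk, hrlo, hrhi, rfl⟩, j, hj, hclo, hchi, rfl⟩
    refine ⟨(↑k, l[k]), ⟨k, hk, by simp⟩, (↑j, l[k][j]), ⟨j, hj, by simp⟩, ?_⟩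
    simp only [beq_self_eq_true, Bool.true_and, Bool.and_eq_true, hr, hc,
      decide_eq_true_eq]
    exact ⟨⟨hrlo, hrhi⟩, hclo, hchi⟩
  · rintro ⟨⟨ri, r⟩, ⟨k, hk, hkeq⟩, ⟨ci, e⟩, ⟨j, hj, hjeq⟩, heq⟩
    simp only [Prod.mk.injEq] at hkeq
    obtain ⟨rfl, rfl⟩ := hkeq
    simp only at hj hjeq
    simp only [Prod.mk.injEq] at hjeq
    obtain ⟨rfl, rfl⟩ := hjeq
    simp only [zero_add, hr, hc, Bool.and_eq_true, beq_iff_eq, decide_eq_true_eq] at heq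
    obtain ⟨⟨hei, hrk1, hrk2⟩, hck1, hck2⟩ := heq
    exact ⟨l[k], ⟨k, hk, hrk1, hrk2, rfl⟩, j, hj, hck1, hck2, hei⟩

-- band value of a nonnegative coordinate against each of the three coordinate ranges
theorem band_lt3 (t : Int) (ht : t < 3) (k : Nat) :
    (pvBand ↑k == pvBand t) = (decide ((0:Nat) ≤ k) && inHi (some 3) k) := by
  simp only [pvBand, inHi]
  split_ifs <;> simp <;> omega

theorem band_mid (t : Int) (ht1 : 2 < t) (ht2 : t < 6) (k : Nat) :
    (pvBand ↑k == pvBand t) = (decide ((3:Nat) ≤ k) && inHi (some 6) k) := by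
  simp only [pvBand, inHi]
  split_ifs <;> simp <;> omega

theorem band_ge6 (t : Int) (ht : 5 < t) (k : Nat) :
    (pvBand ↑k == pvBand t) = (decide ((6:Nat) ≤ k) && inHi (none : Option Nat) k) := by
  simp only [pvBand, inHi]
  split_ifs <;> simp <;> omega

-- A's three slice shapes, as bandSlices
theorem slice_band0 {α : Type} (xs : List α) :
    PySem.List.slice xs none (some 3) = bandSlice xs 0 (some 3) := by
  have := PySem.List.slice_to_natCast xs 3
  simp only [bandSlice, List.drop_zero]
  exact_mod_cast this

theorem slice_band1 {α : Type} (xs : List α) :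
    PySem.List.slice xs (some 3) (some 6) = bandSlice xs 3 (some 6) := by
  have := PySem.List.slice_natCast xs 3 6
  simp only [bandSlice]
  exact_mod_cast this

theorem slice_band2 {α : Type} (xs : List α) :
    PySem.List.slice xs (some 6) none = bandSlice xs 6 none := by
  have := PySem.List.slice_from_natCast xs 6
  simp only [bandSlice]
  exact_mod_cast this

-- ===== VERDICT =====
theorem kuai_spec : Claim_equal_kuai := by
  unfold Claim_equal_kuai Spec_kuai
  intro l x y num_l _
  simp only [kuai, kuai_alt]
  split_ifs with h1 h2 h3 h4 h5 h6 h7 h8 <;>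
    [skip; skip; skip; skip; skip; skip; skip; skip;
     (have h9 : 5 < x ∧ 5 < y := by omega)] <;>
  · apply List.filter_congr
    intro i _
    congr 1
    first
    | exact box_scan l x y i _ _ 0 0 (some 3) (some 3) (slice_band0 l)
        (fun r => slice_band0 r) (band_lt3 y (by omega)) (band_lt3 x (by omega))
    | exact box_scan l x y i _ _ 0 3 (some 3) (some 6) (slice_band0 l)
        (fun r => slice_band1 r) (band_lt3 y (by omega)) (band_mid x (by omega) (by omega))
    | exact box_scan l x y i _ _ 0 6 (some 3) none (slice_band0 l)
        (fun r => slice_band2 r) (band_lt3 y (by omega)) (band_ge6 x (by omega))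
    | exact box_scan l x y i _ _ 3 0 (some 6) (some 3) (slice_band1 l)
        (fun r => slice_band0 r) (band_mid y (by omega) (by omega)) (band_lt3 x (by omega))
    | exact box_scan l x y i _ _ 3 3 (some 6) (some 6) (slice_band1 l)
        (fun r => slice_band1 r) (band_mid y (by omega) (by omega)) (band_mid x (by omega) (by omega))
    | exact box_scan l x y i _ _ 3 6 (some 6) none (slice_band1 l)
        (fun r => slice_band2 r) (band_mid y (by omega) (by omega)) (band_ge6 x (by omega))
    | exact box_scan l x y i _ _ 6 0 none (some 3) (slice_band2 l)
        (fun r => slice_band0 r) (band_ge6 y (by omega)) (band_lt3 x (by omega))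
    | exact box_scan l x y i _ _ 6 3 none (some 6) (slice_band2 l)
        (fun r => slice_band1 r) (band_ge6 y (by omega)) (band_mid x (by omega) (by omega))
    | exact box_scan l x y i _ _ 6 6 none none (slice_band2 l)
        (fun r => slice_band2 r) (band_ge6 y (by omega)) (band_ge6 x (by omega))
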